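-- pv_equiv track=rewrite | github.com/gabrielkenzo/advent_of_code_2023 | day4/main.py | add_to_queue
-- ===== SOURCE A (Python) =====
-- def add_to_queue(queue, num_of_winning_numbers, current_quantity):
--     initial_queue_len = len(queue)
--     i = 0
--     while i < num_of_winning_numbers:
--         if i < initial_queue_len:
--             queue[i] += current_quantity
--         else:
--             queue.append(current_quantity)
--         i += 1
--     return queue
-- ===== SOURCE B (Python) =====
-- # B: two branch-free passes (slice-map the overlapping prefix, then extend once)
-- # instead of A's single conditional while-loop; mutates `queue` in place like A.
-- def add_to_queue(queue, num_of_winning_numbers, current_quantity):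
--     k = max(0, min(num_of_winning_numbers, len(queue)))
--     head = [x + current_quantity for x in queue[:k]]
--     tail = queue[k:]
--     ext = [current_quantity] * max(num_of_winning_numbers - len(queue), 0)
--     queue[:] = head + tail + ext
--     return queue
-- ===== Notes on version B (the rewrite author's own statement) =====
-- stated objective: simpler
-- what changed: Replaced the conditional while-loop over a running index with a branch-free decomposition: map +quantity over the overlapping prefix slice, keep the rest, and extend once with the replicated surplus.
import Mathlib
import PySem

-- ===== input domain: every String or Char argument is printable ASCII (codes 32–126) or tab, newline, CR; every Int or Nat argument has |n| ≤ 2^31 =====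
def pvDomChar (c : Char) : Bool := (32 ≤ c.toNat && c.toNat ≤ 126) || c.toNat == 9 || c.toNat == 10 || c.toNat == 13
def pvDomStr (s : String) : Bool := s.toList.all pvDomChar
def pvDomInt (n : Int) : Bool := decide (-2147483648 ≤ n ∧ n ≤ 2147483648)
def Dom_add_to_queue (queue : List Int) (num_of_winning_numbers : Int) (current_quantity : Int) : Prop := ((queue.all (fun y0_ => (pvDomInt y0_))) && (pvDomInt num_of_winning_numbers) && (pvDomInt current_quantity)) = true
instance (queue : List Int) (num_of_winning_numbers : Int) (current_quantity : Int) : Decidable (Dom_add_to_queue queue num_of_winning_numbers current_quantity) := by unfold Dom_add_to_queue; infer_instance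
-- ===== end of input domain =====

-- B replaces A's conditional while-loop with two branch-free passes (map the overlapping
-- prefix, extend once with the replicated surplus); same cost, same in-place mutation of queue.
-- ===== PORT A =====
def addLoop (queue : List Int) (initial_queue_len : Int) (i : Int) (num_of_winning_numbers : Int) (current_quantity : Int) : List Int :=
  if h : i < num_of_winning_numbers then
    let queue' :=
      if i < initial_queue_len then
        match PySem.List.pyGet? queue i with
        | some v => queue.set i.toNat (v + current_quantity)
        | none => queue
      else
        queue ++ [current_quantity]
    addLoop queue' initial_queue_len (i + 1) num_of_winning_numbers current_quantity
  else
    queue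
termination_by (num_of_winning_numbers - i).toNat
decreasing_by omega

def add_to_queue (queue : List Int) (num_of_winning_numbers : Int) (current_quantity : Int) : List Int :=
  addLoop queue (queue.length : Int) 0 num_of_winning_numbers current_quantity

-- ===== PORT B =====
def add_to_queue_alt (queue : List Int) (num_of_winning_numbers : Int) (current_quantity : Int) : List Int :=
  let k := max 0 (min num_of_winning_numbers (queue.length : Int))
  let head := (PySem.List.slice queue none (some k)).map (fun x => x + current_quantity)
  let tail := PySem.List.slice queue (some k) none
  let ext := List.replicate (max (num_of_winning_numbers - (queue.length : Int)) 0).toNat current_quantity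
  head ++ tail ++ ext

-- ===== PRECONDITION & SPEC =====
def Spec_add_to_queue (queue : List Int) (num_of_winning_numbers : Int) (current_quantity : Int) (out : List Int) : Prop := out = add_to_queue_alt queue num_of_winning_numbers current_quantity
instance (queue : List Int) (num_of_winning_numbers : Int) (current_quantity : Int) (out : List Int) : Decidable (Spec_add_to_queue queue num_of_winning_numbers current_quantity out) := by unfold Spec_add_to_queue; infer_instance

-- ===== CLAIM (what is proved, stated in full; the proofs are below) =====
def Claim_equal_add_to_queue : Prop := ∀ (queue : List Int) (num_of_winning_numbers : Int) (current_quantity : Int), Dom_add_to_queue queue num_of_winning_numbers current_quantity → Spec_add_to_queue queue num_of_winning_numbers current_quantity (add_to_queue queue num_of_winning_numbers current_quantity)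

-- ===== LEMMAS AND PROOFS =====


-- phase 2: index already past the initial length, the loop only appends
lemma addLoop_append (m : Nat) : ∀ (queue : List Int) (len0 i n q : Int),
    (n - i).toNat = m → len0 ≤ i →
    addLoop queue len0 i n q = queue ++ List.replicate (n - i).toNat q := by
  induction m with
  | zero =>
    intro queue len0 i n q hm h
    rw [addLoop]
    simp only [dif_neg (by omega : ¬ i < n)]
    simp [hm]
  | succ m ih =>
    intro queue len0 i n q hm h
    rw [addLoop]
    simp only [dif_pos (by omega : i < n), if_neg (by omega : ¬ i < len0)]
    rw [ih (queue ++ [q]) len0 (i + 1) n q (by omega) (by omega)]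
    have : (n - i).toNat = (n - (i + 1)).toNat + 1 := by omega
    rw [hm] at this ⊢
    rw [this, List.replicate_succ, List.append_assoc]
    rfl

-- phase 1: queue = pre ++ mid, indices before pre.length already processed
lemma addLoop_main : ∀ (mid pre : List Int) (n q : Int),
    addLoop (pre ++ mid) ((pre.length : Int) + mid.length) pre.length n q =
      pre ++ (mid.take (n - pre.length).toNat).map (fun x => x + q)
          ++ mid.drop (n - pre.length).toNat
          ++ List.replicate (n - pre.length - mid.length).toNat q := by
  intro mid
  induction mid with
  | nil =>
    intro pre n q
    rw [addLoop_append (n - (pre.length : Int)).toNat (pre ++ []) _ _ _ _ rfl (by simp)]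
    simp
  | cons x xs ih =>
    intro pre n q
    by_cases hn : (pre.length : Int) < n
    · rw [addLoop]
      simp only [dif_pos hn, if_pos (by simp : (pre.length : Int) < (pre.length : Int) + (x :: xs).length)]
      rw [PySem.List.pyGet?_append_length]
      dsimp only
      have hset : (pre ++ x :: xs).set (pre.length : Int).toNat (x + q) = (pre ++ [x + q]) ++ xs := by
        simp [List.append_assoc]
      rw [hset]
      have hlen : ((pre ++ [x + q]).length : Int) = (pre.length : Int) + 1 := by simp
      have := ih (pre ++ [x + q]) n q
      rw [hlen] at this
      have harg : (pre.length : Int) + 1 + (xs.length : Int) = (pre.length : Int) + ((x :: xs).length : Int) := by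
        simp; omega
      rw [harg] at this
      rw [this]
      have ht : (n - (pre.length : Int)).toNat = (n - ((pre.length : Int) + 1)).toNat + 1 := by omega
      rw [ht]
      simp only [List.take_succ_cons, List.drop_succ_cons, List.map_cons, List.length_cons]
      have : n - ((pre.length : Int) + 1) - (xs.length : Int) = n - (pre.length : Int) - ((xs.length : Int) + 1) := by ring
      rw [this]
      simp [List.append_assoc]
    · rw [addLoop]
      simp only [dif_neg hn]
      have h0 : (n - (pre.length : Int)).toNat = 0 := by omega
      have h1 : (n - (pre.length : Int) - ((x :: xs).length : Int)).toNat = 0 := by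
        simp only [List.length_cons]; omega
      rw [h0, h1]
      simp

-- ===== VERDICT (by name: the statement is the Claim_ definition above) =====
theorem add_to_queue_spec : Claim_equal_add_to_queue := by
  intro queue n q _
  simp only [Spec_add_to_queue, add_to_queue, add_to_queue_alt]
  have := addLoop_main queue [] n q
  simp only [List.nil_append, List.length_nil, CharP.cast_eq_zero, zero_add,
    Int.sub_zero] at this
  rw [this]
  have hk : 0 ≤ max 0 (min n (queue.length : Int)) := by omega
  rw [PySem.List.slice_to (xs := queue) (b := max 0 (min n (queue.length : Int))) (by omega),
    PySem.List.slice_from (xs := queue) (a := max 0 (min n (queue.length : Int))) hk]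
  have htk : queue.take n.toNat = queue.take (max 0 (min n (queue.length : Int))).toNat := by
    by_cases h : n ≤ (queue.length : Int)
    · congr 1; omega
    · rw [List.take_of_length_le (by omega), List.take_of_length_le (by omega)]
  have hdr : queue.drop n.toNat = queue.drop (max 0 (min n (queue.length : Int))).toNat := by
    by_cases h : n ≤ (queue.length : Int)
    · congr 1; omega
    · rw [List.drop_of_length_le (by omega), List.drop_of_length_le (by omega)]
  have hrep : (n - (queue.length : Int)).toNat = (max (n - (queue.length : Int)) 0).toNat := by omega
  rw [htk, hdr, hrep]
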